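-- pv_equiv track=rewrite | github.com/SSAFYnity/Job-Preparation-Challenge-1st | CodeTree/Sam의피자학교/Sam의피자학교_이동우.py | press_dough
-- ===== SOURCE A (Python) =====
-- def press_dough(dough):
--     add_f = [[0] * len(dough[0]) for _ in range(len(dough))]
--     for i in range(len(dough)):
--         for j in range(len(dough[0])):
--             if i and dough[i - 1][j] and dough[i][j]:
--                 if dough[i][j] > dough[i - 1][j]:
--                     add_f[i - 1][j] -= (dough[i][j] - dough[i - 1][j]) // 5
--                     add_f[i][j] += (dough[i][j] - dough[i - 1][j]) // 5
--                 else: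
--                     add_f[i - 1][j] += (dough[i - 1][j] - dough[i][j]) // 5
--                     add_f[i][j] -= (dough[i - 1][j] - dough[i][j]) // 5
--             if j and dough[i][j - 1] and dough[i][j]:
--                 if dough[i][j] > dough[i][j - 1]:
--                     add_f[i][j - 1] -= (dough[i][j] - dough[i][j - 1]) // 5
--                     add_f[i][j] += (dough[i][j] - dough[i][j - 1]) // 5
--                 else:
--                     add_f[i][j - 1] += (dough[i][j - 1] - dough[i][j]) // 5
--                     add_f[i][j] -= (dough[i][j - 1] - dough[i][j]) // 5
--     for i in range(len(dough)):
--         for j in range(len(dough[0])):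
--             dough[i][j] -= add_f[i][j]
--     spread_dough = []
--     for j in range(len(dough[0])):
--         for i in range(len(dough) - 1, -1, -1):
--             if dough[i][j]:
--                 spread_dough.append(dough[i][j])
--     return spread_dough
-- ===== SOURCE B (Python) =====
-- def press_dough(dough):
--     n, m = len(dough), len(dough[0])
--
--     def delta(i, j):
--         d = 0
--         if dough[i][j]:
--             for ni, nj in ((i - 1, j), (i + 1, j), (i, j - 1), (i, j + 1)):
--                 if 0 <= ni < n and 0 <= nj < m and dough[ni][nj]:
--                     if dough[i][j] > dough[ni][nj]:
--                         d += (dough[i][j] - dough[ni][nj]) // 5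
--                     else:
--                         d -= (dough[ni][nj] - dough[i][j]) // 5
--         return d
--
--     new = [[dough[i][j] - delta(i, j) for j in range(m)] for i in range(n)]
--     return [new[i][j] for j in range(m) for i in reversed(range(n)) if new[i][j]]
-- ===== Notes on version B (the rewrite author's own statement) =====
-- stated objective: alternative
-- what changed: Replaced A's edge-centric scatter (each edge writes +/- into both endpoints of a mutable accumulator grid, then dough is mutated in place) by a cell-centric gather: each cell independently sums its net change from its four bounds-checked neighbors, and a fresh result grid is built without mutating the input.
import Mathlib
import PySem

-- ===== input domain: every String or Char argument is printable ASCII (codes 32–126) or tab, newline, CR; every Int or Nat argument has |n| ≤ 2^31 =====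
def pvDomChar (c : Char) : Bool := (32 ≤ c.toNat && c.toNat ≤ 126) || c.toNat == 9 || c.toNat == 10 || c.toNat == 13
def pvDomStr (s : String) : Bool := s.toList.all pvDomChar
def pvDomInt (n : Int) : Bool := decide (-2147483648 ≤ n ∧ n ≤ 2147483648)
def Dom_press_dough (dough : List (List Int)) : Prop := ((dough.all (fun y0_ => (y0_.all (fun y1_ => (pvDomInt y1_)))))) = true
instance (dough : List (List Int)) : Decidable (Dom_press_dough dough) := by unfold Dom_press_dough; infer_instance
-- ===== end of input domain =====

-- B replaces A's edge-centric scatter into a mutable accumulator grid by a cell-centric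
-- gather over the four neighbors (objective: alternative decomposition, same cost).
-- Note: A mutates its argument `dough` in place, B does not — the equivalence proved
-- here is about the RETURN value only.

-- ===== PORT A =====
-- shared low-level grid access: g[i][j] (0 outside; every Python access is in range under Pre_)
def pvGet (g : List (List Int)) (i j : Nat) : Int := (g.getD i []).getD j 0

-- g[i][j] += v  (Python's `-=` is ported as adding the negated value)
def pvUpd (g : List (List Int)) (i j : Nat) (v : Int) : List (List Int) :=
  g.modify i (fun row => row.modify j (fun x => x + v))

def pvDiv5 (x : Int) : Int := PySem.Int.floordiv x 5

-- the `if i and dough[i-1][j] and dough[i][j]` block of A's inner loop body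
def stepV (dough g : List (List Int)) (i j : Nat) : List (List Int) :=
  if i ≠ 0 ∧ pvGet dough (i-1) j ≠ 0 ∧ pvGet dough i j ≠ 0 then
    if pvGet dough i j > pvGet dough (i-1) j then
      pvUpd (pvUpd g (i-1) j (-(pvDiv5 (pvGet dough i j - pvGet dough (i-1) j)))) i j
        (pvDiv5 (pvGet dough i j - pvGet dough (i-1) j))
    else
      pvUpd (pvUpd g (i-1) j (pvDiv5 (pvGet dough (i-1) j - pvGet dough i j))) i j
        (-(pvDiv5 (pvGet dough (i-1) j - pvGet dough i j)))
  else g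

-- the `if j and dough[i][j-1] and dough[i][j]` block of A's inner loop body
def stepH (dough g : List (List Int)) (i j : Nat) : List (List Int) :=
  if j ≠ 0 ∧ pvGet dough i (j-1) ≠ 0 ∧ pvGet dough i j ≠ 0 then
    if pvGet dough i j > pvGet dough i (j-1) then
      pvUpd (pvUpd g i (j-1) (-(pvDiv5 (pvGet dough i j - pvGet dough i (j-1))))) i j
        (pvDiv5 (pvGet dough i j - pvGet dough i (j-1)))
    else
      pvUpd (pvUpd g i (j-1) (pvDiv5 (pvGet dough i (j-1) - pvGet dough i j))) i j
        (-(pvDiv5 (pvGet dough i (j-1) - pvGet dough i j)))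
  else g

-- literal port of A; Python's range(len(dough)-1,-1,-1) is ported as (List.range n).reverse
def press_dough (dough : List (List Int)) : List Int :=
  let n := dough.length
  let m := (dough.getD 0 []).length
  let addf0 : List (List Int) := (List.range n).map (fun _ => List.replicate m (0:Int))
  let addf := (List.range n).foldl
    (fun g i => (List.range m).foldl (fun g j => stepH dough (stepV dough g i j) i j) g) addf0
  let dough2 := (List.range n).foldl
    (fun g i => (List.range m).foldl (fun g j => pvUpd g i j (-(pvGet addf i j))) g) dough
  (List.range m).foldl
    (fun acc j => ((List.range n).reverse).foldl
      (fun acc i => if pvGet dough2 i j ≠ 0 then acc ++ [pvGet dough2 i j] else acc) acc) []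

-- ===== PORT B =====
-- net change gathered from one neighbor: +(self-nbr)//5 if self is larger, else -(nbr-self)//5
def nbrContrib (self nbr : Int) : Int :=
  if self > nbr then pvDiv5 (self - nbr) else -(pvDiv5 (nbr - self))

-- delta(i, j) of Source B: fold over the four neighbor coordinates with bounds checks
def deltaAt (dough : List (List Int)) (n m i j : Nat) : Int :=
  if pvGet dough i j = 0 then 0 else
    [((i:Int)-1, (j:Int)), ((i:Int)+1, (j:Int)), ((i:Int), (j:Int)-1), ((i:Int), (j:Int)+1)].foldl
      (fun acc p =>
        if 0 ≤ p.1 ∧ p.1 < (n:Int) ∧ 0 ≤ p.2 ∧ p.2 < (m:Int) ∧ pvGet dough p.1.toNat p.2.toNat ≠ 0 then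
          acc + nbrContrib (pvGet dough i j) (pvGet dough p.1.toNat p.2.toNat)
        else acc) 0

def press_dough_alt (dough : List (List Int)) : List Int :=
  let n := dough.length
  let m := (dough.getD 0 []).length
  let newg := (List.range n).map
    (fun i => (List.range m).map (fun j => pvGet dough i j - deltaAt dough n m i j))
  (List.range m).flatMap
    (fun j => (((List.range n).reverse).map (fun i => pvGet newg i j)).filter (fun v => v ≠ 0))

-- ===== PRECONDITION & SPEC =====
-- Pre_ excludes exactly the inputs on which Python A raises IndexError: the empty list
-- (len(dough[0])) and grids with a row shorter than row 0 (dough[i][j], j < len(dough[0])).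
def Pre_press_dough (dough : List (List Int)) : Prop :=
  dough ≠ [] ∧ ∀ r ∈ dough, (dough.getD 0 []).length ≤ r.length
instance (dough : List (List Int)) : Decidable (Pre_press_dough dough) := by
  unfold Pre_press_dough; infer_instance

def pvWitness_press_dough : List (List Int) := [[10, 0], [1, 3]]

def Spec_press_dough (dough : List (List Int)) (out : List Int) : Prop := out = press_dough_alt dough
instance (dough : List (List Int)) (out : List Int) : Decidable (Spec_press_dough dough out) := by
  unfold Spec_press_dough; infer_instance

-- ===== CLAIM (what is proved, stated in full; the proofs are below) =====
def Claim_equal_press_dough : Prop := ∀ (dough : List (List Int)),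
  Dom_press_dough dough → Pre_press_dough dough → Spec_press_dough dough (press_dough dough)

-- ===== LEMMAS AND PROOFS =====

-- shape invariant of the grids A scatters into: n rows, each of length ≥ m
def pvShape (n m : Nat) (g : List (List Int)) : Prop :=
  g.length = n ∧ ∀ a, a < n → m ≤ (g.getD a []).length

-- net amount A's vertical (resp. horizontal) edge step at (i,j) adds to cell (i,j) itself
def tv (dough : List (List Int)) (i j : Nat) : Int :=
  if i ≠ 0 ∧ pvGet dough (i-1) j ≠ 0 ∧ pvGet dough i j ≠ 0 then
    (if pvGet dough i j > pvGet dough (i-1) j then pvDiv5 (pvGet dough i j - pvGet dough (i-1) j)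
     else -(pvDiv5 (pvGet dough (i-1) j - pvGet dough i j)))
  else 0

def th (dough : List (List Int)) (i j : Nat) : Int :=
  if j ≠ 0 ∧ pvGet dough i (j-1) ≠ 0 ∧ pvGet dough i j ≠ 0 then
    (if pvGet dough i j > pvGet dough i (j-1) then pvDiv5 (pvGet dough i j - pvGet dough i (j-1))
     else -(pvDiv5 (pvGet dough i (j-1) - pvGet dough i j)))
  else 0

-- total addition A's loop body at (i,j) makes to cell (a,b)
def sd (dough : List (List Int)) (i j a b : Nat) : Int :=
  ((if a = i ∧ b = j then tv dough i j else 0) +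
   (if i ≠ 0 ∧ a = i - 1 ∧ b = j then -(tv dough i j) else 0)) +
  ((if a = i ∧ b = j then th dough i j else 0) +
   (if j ≠ 0 ∧ a = i ∧ b = j - 1 then -(th dough i j) else 0))

-- the closed-form net change of cell (a,b), common to both programs
def Fnet (dough : List (List Int)) (m a b : Nat) : Int :=
  tv dough a b + th dough a b - tv dough (a+1) b - (if b + 1 < m then th dough a (b+1) else 0)

theorem getD_modify (l : List (List Int)) (i : Nat) (f : List Int → List Int) (a : Nat) :
    (l.modify i f).getD a [] = if i = a ∧ a < l.length then f (l.getD a []) else l.getD a [] := by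
  simp only [List.getD_eq_getElem?_getD, List.getElem?_modify]
  by_cases h2 : a < l.length
  · by_cases h : i = a <;> simp [h, h2]
  · have := List.getElem?_eq_none (l := l) (le_of_not_gt h2)
    simp [h2]

theorem getDI_modify (l : List Int) (j : Nat) (f : Int → Int) (b : Nat) :
    (l.modify j f).getD b 0 = if j = b ∧ b < l.length then f (l.getD b 0) else l.getD b 0 := by
  simp only [List.getD_eq_getElem?_getD, List.getElem?_modify]
  by_cases h2 : b < l.length
  · by_cases h : j = b <;> simp [h, h2]
  · have := List.getElem?_eq_none (l := l) (le_of_not_gt h2)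
    simp [h2]

theorem pvShape_pvUpd {n m : Nat} {g : List (List Int)} (hs : pvShape n m g) (i j : Nat) (v : Int) :
    pvShape n m (pvUpd g i j v) := by
  obtain ⟨h1, h2⟩ := hs
  refine ⟨by simpa [pvUpd] using h1, fun a ha => ?_⟩
  rw [pvUpd, getD_modify]
  split
  · simpa using h2 a ha
  · exact h2 a ha

theorem pvGet_pvUpd {n m : Nat} {g : List (List Int)} (hs : pvShape n m g) {i j : Nat}
    (hi : i < n) (hj : j < m) (v : Int) (a b : Nat) :
    pvGet (pvUpd g i j v) a b = pvGet g a b + (if a = i ∧ b = j then v else 0) := by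
  obtain ⟨h1, h2⟩ := hs
  rw [pvGet, pvUpd, getD_modify]
  by_cases hia : i = a
  · subst hia
    rw [if_pos ⟨rfl, h1 ▸ hi⟩, getDI_modify]
    by_cases hjb : j = b
    · subst hjb
      rw [if_pos ⟨rfl, lt_of_lt_of_le hj (h2 i hi)⟩, if_pos ⟨rfl, rfl⟩]
      rfl
    · rw [if_neg (fun h => hjb h.1), if_neg (fun h => hjb h.2.symm), add_zero]
      rfl
  · rw [if_neg (fun h => hia h.1), if_neg (fun h => hia h.1.symm), add_zero]
    rfl

theorem pvShape_stepV {n m : Nat} (dough : List (List Int)) {g : List (List Int)}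
    (hs : pvShape n m g) (i j : Nat) : pvShape n m (stepV dough g i j) := by
  unfold stepV
  split
  · split <;> exact pvShape_pvUpd (pvShape_pvUpd hs _ _ _) _ _ _
  · exact hs

theorem pvShape_stepH {n m : Nat} (dough : List (List Int)) {g : List (List Int)}
    (hs : pvShape n m g) (i j : Nat) : pvShape n m (stepH dough g i j) := by
  unfold stepH
  split
  · split <;> exact pvShape_pvUpd (pvShape_pvUpd hs _ _ _) _ _ _
  · exact hs

theorem pvGet_stepV {n m : Nat} (dough : List (List Int)) {g : List (List Int)}
    (hs : pvShape n m g) {i j : Nat} (hi : i < n) (hj : j < m) (a b : Nat) :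
    pvGet (stepV dough g i j) a b = pvGet g a b +
      ((if a = i ∧ b = j then tv dough i j else 0) +
       (if i ≠ 0 ∧ a = i - 1 ∧ b = j then -(tv dough i j) else 0)) := by
  unfold stepV tv
  by_cases hc : i ≠ 0 ∧ pvGet dough (i-1) j ≠ 0 ∧ pvGet dough i j ≠ 0
  · rw [if_pos hc, if_pos hc]
    have hi1 : i - 1 < n := by omega
    obtain ⟨hi0, -, -⟩ := hc
    split <;>
    · rw [pvGet_pvUpd (pvShape_pvUpd hs _ _ _) hi hj, pvGet_pvUpd hs hi1 hj]
      by_cases h1 : a = i ∧ b = j <;> by_cases h2 : a = i - 1 ∧ b = j <;>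
        simp [h1, h2, hi0] <;> ring
  · rw [if_neg hc, if_neg hc]
    simp

theorem pvGet_stepH {n m : Nat} (dough : List (List Int)) {g : List (List Int)}
    (hs : pvShape n m g) {i j : Nat} (hi : i < n) (hj : j < m) (a b : Nat) :
    pvGet (stepH dough g i j) a b = pvGet g a b +
      ((if a = i ∧ b = j then th dough i j else 0) +
       (if j ≠ 0 ∧ a = i ∧ b = j - 1 then -(th dough i j) else 0)) := by
  unfold stepH th
  by_cases hc : j ≠ 0 ∧ pvGet dough i (j-1) ≠ 0 ∧ pvGet dough i j ≠ 0
  · rw [if_pos hc, if_pos hc]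
    have hj1 : j - 1 < m := by omega
    obtain ⟨hj0, -, -⟩ := hc
    split <;>
    · rw [pvGet_pvUpd (pvShape_pvUpd hs _ _ _) hi hj, pvGet_pvUpd hs hi hj1]
      by_cases h1 : a = i ∧ b = j <;> by_cases h2 : a = i ∧ b = j - 1 <;>
        simp [h1, h2, hj0] <;> ring
  · rw [if_neg hc, if_neg hc]
    simp

-- generic characterization of a double fold over the grid cells whose step adds σ i j pointwise
theorem fold2_gget {n m : Nat} (step : List (List Int) → Nat → Nat → List (List Int))
    (σ : Nat → Nat → Nat → Nat → Int)
    (hstep : ∀ g i j, i < n → j < m → pvShape n m g →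
      pvShape n m (step g i j) ∧ ∀ a b, pvGet (step g i j) a b = pvGet g a b + σ i j a b)
    (g : List (List Int)) (hg : pvShape n m g) :
    pvShape n m ((List.range n).foldl
        (fun g i => (List.range m).foldl (fun g j => step g i j) g) g) ∧
      ∀ a b, pvGet ((List.range n).foldl
        (fun g i => (List.range m).foldl (fun g j => step g i j) g) g) a b
        = pvGet g a b + ∑ i ∈ Finset.range n, ∑ j ∈ Finset.range m, σ i j a b := by
  have inner : ∀ i, i < n → ∀ k, k ≤ m → ∀ g, pvShape n m g →
      pvShape n m ((List.range k).foldl (fun g j => step g i j) g) ∧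
      ∀ a b, pvGet ((List.range k).foldl (fun g j => step g i j) g) a b
        = pvGet g a b + ∑ j ∈ Finset.range k, σ i j a b := by
    intro i hi k
    induction k with
    | zero => intro _ g hg; exact ⟨hg, fun a b => by simp⟩
    | succ k ih =>
      intro hk g hg
      obtain ⟨sh, hv⟩ := ih (by omega) g hg
      rw [List.range_succ, List.foldl_append]
      simp only [List.foldl_cons, List.foldl_nil]
      obtain ⟨sh2, hv2⟩ := hstep _ i k hi (by omega) sh
      refine ⟨sh2, fun a b => ?_⟩
      rw [hv2, hv, Finset.sum_range_succ]; ring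
  have outer : ∀ K, K ≤ n → ∀ g, pvShape n m g →
      pvShape n m ((List.range K).foldl
        (fun g i => (List.range m).foldl (fun g j => step g i j) g) g) ∧
      ∀ a b, pvGet ((List.range K).foldl
        (fun g i => (List.range m).foldl (fun g j => step g i j) g) g) a b
        = pvGet g a b + ∑ i ∈ Finset.range K, ∑ j ∈ Finset.range m, σ i j a b := by
    intro K
    induction K with
    | zero => intro _ g hg; exact ⟨hg, fun a b => by simp⟩
    | succ K ih =>
      intro hK g hg
      obtain ⟨sh, hv⟩ := ih (by omega) g hg
      rw [List.range_succ, List.foldl_append]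
      simp only [List.foldl_cons, List.foldl_nil]
      obtain ⟨sh2, hv2⟩ := inner K (by omega) m le_rfl _ sh
      refine ⟨sh2, fun a b => ?_⟩
      rw [hv2, hv, Finset.sum_range_succ]; ring
  exact outer n le_rfl g hg

theorem pvGet_out (dough : List (List Int)) {i : Nat} (h : dough.length ≤ i) (j : Nat) :
    pvGet dough i j = 0 := by
  rw [pvGet, List.getD_eq_default _ _ h]; rfl

theorem tv_out (dough : List (List Int)) {i : Nat} (h : dough.length ≤ i) (j : Nat) :
    tv dough i j = 0 := by
  rw [tv, if_neg]
  rw [pvGet_out dough h j]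
  simp

theorem pvDiv5_zero : pvDiv5 0 = 0 := by decide

-- evaluation of a point-supported double sum over the grid indices
theorem sum2_pt (N M : Nat) (c : Nat → Nat → Int) (s t : Nat) :
    (∑ i ∈ Finset.range N, ∑ j ∈ Finset.range M, (if i = s ∧ j = t then c i j else 0))
      = if s < N ∧ t < M then c s t else 0 := by
  have inner : ∀ i, (∑ j ∈ Finset.range M, (if i = s ∧ j = t then c i j else 0))
      = if i = s then (if t < M then c i t else 0) else 0 := by
    intro i
    by_cases h : i = s
    · subst h
      simp only [true_and]
      rw [Finset.sum_ite_eq' (Finset.range M) t (fun j => c i j)]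
      simp [Finset.mem_range]
    · simp [h]
  rw [Finset.sum_congr rfl (fun i _ => inner i)]
  rw [Finset.sum_ite_eq' (Finset.range N) s (fun i => if t < M then c i t else 0)]
  simp [Finset.mem_range, ite_and]

theorem sum_sd_eq (dough : List (List Int)) (m : Nat) {a b : Nat}
    (ha : a < dough.length) (hb : b < m) :
    (∑ i ∈ Finset.range dough.length, ∑ j ∈ Finset.range m, sd dough i j a b)
      = Fnet dough m a b := by
  have e1 : ∀ i j : Nat, (a = i ∧ b = j) ↔ (i = a ∧ j = b) := by intro i j; omega
  have e2 : ∀ i j : Nat, (i ≠ 0 ∧ a = i - 1 ∧ b = j) ↔ (i = a + 1 ∧ j = b) := by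
    intro i j; omega
  have e3 : ∀ i j : Nat, (j ≠ 0 ∧ a = i ∧ b = j - 1) ↔ (i = a ∧ j = b + 1) := by
    intro i j; omega
  unfold sd
  simp only [e2]
  simp only [e3]
  simp only [e1]
  simp only [Finset.sum_add_distrib, sum2_pt]
  have hv : ¬ (a + 1 < dough.length) → tv dough (a+1) b = 0 := fun h =>
    tv_out dough (by omega) b
  by_cases h2 : a + 1 < dough.length <;> by_cases h4 : b + 1 < m <;>
    simp [Fnet, ha, hb, h2, h4, hv] <;> ring

-- B's four-neighbor gather computes exactly the closed-form net change
theorem deltaAt_eq (dough : List (List Int)) (m : Nat) {a b : Nat}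
    (ha : a < dough.length) (hb : b < m) :
    deltaAt dough dough.length m a b = Fnet dough m a b := by
  unfold deltaAt
  by_cases hz : pvGet dough a b = 0
  · rw [if_pos hz]
    have t1 : tv dough a b = 0 := by rw [tv, if_neg]; simp [hz]
    have t2 : th dough a b = 0 := by rw [th, if_neg]; simp [hz]
    have t3 : tv dough (a+1) b = 0 := by
      rw [tv, if_neg]; simp [hz]
    have t4 : th dough a (b+1) = 0 := by
      rw [th, if_neg]; simp [hz]
    simp [Fnet, t1, t2, t3, t4]
  · rw [if_neg hz]
    simp only [List.foldl_cons, List.foldl_nil]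
    have hre : ∀ (c : Prop) [Decidable c] (acc v : Int),
        (if c then acc + v else acc) = acc + (if c then v else 0) := by
      intro c _ acc v; split <;> simp
    simp only [hre]
    have r1 : ((a:Int) - 1).toNat = a - 1 := by omega
    have r2 : ((a:Int) + 1).toNat = a + 1 := by omega
    have r3 : ((b:Int) - 1).toNat = b - 1 := by omega
    have r4 : ((b:Int) + 1).toNat = b + 1 := by omega
    have r5 : ((a:Int)).toNat = a := by omega
    have r6 : ((b:Int)).toNat = b := by omega
    rw [r1, r2, r3, r4, r5, r6]
    have hU : (if 0 ≤ (a:Int) - 1 ∧ (a:Int) - 1 < (dough.length:Int) ∧ 0 ≤ (b:Int) ∧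
          (b:Int) < (m:Int) ∧ pvGet dough (a-1) b ≠ 0 then
          nbrContrib (pvGet dough a b) (pvGet dough (a-1) b) else 0) = tv dough a b := by
      rw [tv]
      by_cases hc : a ≠ 0 ∧ pvGet dough (a-1) b ≠ 0
      · rw [if_pos ⟨by omega, by omega, by omega, by omega, hc.2⟩, if_pos ⟨hc.1, hc.2, hz⟩]
        rfl
      · rw [if_neg (fun h => hc ⟨by omega, h.2.2.2.2⟩), if_neg (fun h => hc ⟨h.1, h.2.1⟩)]
    have hD : (if 0 ≤ (a:Int) + 1 ∧ (a:Int) + 1 < (dough.length:Int) ∧ 0 ≤ (b:Int) ∧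
          (b:Int) < (m:Int) ∧ pvGet dough (a+1) b ≠ 0 then
          nbrContrib (pvGet dough a b) (pvGet dough (a+1) b) else 0) = -(tv dough (a+1) b) := by
      rw [tv]
      simp only [Nat.add_sub_cancel]
      by_cases hc : a + 1 < dough.length ∧ pvGet dough (a+1) b ≠ 0
      · rw [if_pos ⟨by omega, by omega, by omega, by omega, hc.2⟩,
          if_pos ⟨by omega, hz, hc.2⟩, nbrContrib]
        rcases lt_trichotomy (pvGet dough a b) (pvGet dough (a+1) b) with h|h|h
        · rw [if_neg (by omega), if_pos h]
        · rw [if_neg (by omega), if_neg (by omega), h]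
          simp [pvDiv5_zero]
        · rw [if_pos h, if_neg (by omega), neg_neg]
      · have h0 : pvGet dough (a+1) b = 0 := by
          rcases not_and_or.mp hc with h | h
          · exact pvGet_out dough (by omega) b
          · simpa using h
        rw [if_neg (fun h => h.2.2.2.2 h0), if_neg (fun h => h.2.2 h0), neg_zero]
    have hL : (if 0 ≤ (a:Int) ∧ (a:Int) < (dough.length:Int) ∧ 0 ≤ (b:Int) - 1 ∧
          (b:Int) - 1 < (m:Int) ∧ pvGet dough a (b-1) ≠ 0 then
          nbrContrib (pvGet dough a b) (pvGet dough a (b-1)) else 0) = th dough a b := by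
      rw [th]
      by_cases hc : b ≠ 0 ∧ pvGet dough a (b-1) ≠ 0
      · rw [if_pos ⟨by omega, by omega, by omega, by omega, hc.2⟩, if_pos ⟨hc.1, hc.2, hz⟩]
        rfl
      · rw [if_neg (fun h => hc ⟨by omega, h.2.2.2.2⟩), if_neg (fun h => hc ⟨h.1, h.2.1⟩)]
    have hR : (if 0 ≤ (a:Int) ∧ (a:Int) < (dough.length:Int) ∧ 0 ≤ (b:Int) + 1 ∧
          (b:Int) + 1 < (m:Int) ∧ pvGet dough a (b+1) ≠ 0 then
          nbrContrib (pvGet dough a b) (pvGet dough a (b+1)) else 0)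
        = -(if b + 1 < m then th dough a (b+1) else 0) := by
      by_cases hm : b + 1 < m
      · rw [if_pos hm, th]
        simp only [Nat.add_sub_cancel]
        by_cases hc : pvGet dough a (b+1) ≠ 0
        · rw [if_pos ⟨by omega, by omega, by omega, by omega, hc⟩,
            if_pos ⟨by omega, hz, hc⟩, nbrContrib]
          rcases lt_trichotomy (pvGet dough a b) (pvGet dough a (b+1)) with h|h|h
          · rw [if_neg (by omega), if_pos h]
          · rw [if_neg (by omega), if_neg (by omega), h]
            simp [pvDiv5_zero]
          · rw [if_pos h, if_neg (by omega), neg_neg]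
        · rw [if_neg (fun h => hc h.2.2.2.2), if_neg (fun h => hc h.2.2), neg_zero]
      · rw [if_neg (fun h => hm (by have := h.2.2.2.1; omega)), if_neg hm, neg_zero]
    rw [hU, hD, hL, hR, Fnet]
    ring

theorem collect_inner (w : Nat → Int) (l : List Nat) (acc : List Int) :
    l.foldl (fun acc i => if w i ≠ 0 then acc ++ [w i] else acc) acc
      = acc ++ (l.map w).filter (fun x => decide (x ≠ 0)) := by
  induction l generalizing acc with
  | nil => simp
  | cons x l ih =>
    rw [List.foldl_cons, ih]
    by_cases h : w x = 0
    · simp [h]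
    · simp [h]

-- reading a grid built by nested map over ranges
theorem getD_map_range {α : Type} (n : Nat) (f : Nat → α) (d : α) {a : Nat} (ha : a < n) :
    ((List.range n).map f).getD a d = f a := by
  rw [List.getD_eq_getElem?_getD, List.getElem?_map, List.getElem?_range ha]
  rfl

theorem grid_build_get (n m : Nat) (f : Nat → Nat → Int) {a b : Nat} (ha : a < n) (hb : b < m) :
    pvGet ((List.range n).map (fun i => (List.range m).map (f i))) a b = f a b := by
  rw [pvGet, getD_map_range n _ _ ha, getD_map_range m _ _ hb]

theorem addf0_zero (n m : Nat) (a b : Nat) :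
    pvGet ((List.range n).map (fun _ => List.replicate m (0:Int))) a b = 0 := by
  rw [pvGet]
  by_cases ha : a < n
  · rw [getD_map_range n _ _ ha]
    simp only [List.getD_eq_getElem?_getD, List.getElem?_replicate]
    split <;> rfl
  · rw [show ((List.range n).map (fun _ => List.replicate m (0:Int))).getD a [] = []
        from List.getD_eq_default _ _ (by rw [List.length_map, List.length_range]; omega)]
    rfl

theorem collect_eq (n m : Nat) (w w' : Nat → Nat → Int)
    (h : ∀ i j, i < n → j < m → w i j = w' i j) :
    (List.range m).foldl
        (fun acc j => ((List.range n).reverse).foldl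
          (fun acc i => if w i j ≠ 0 then acc ++ [w i j] else acc) acc) []
      = (List.range m).flatMap
          (fun j => (((List.range n).reverse).map (fun i => w' i j)).filter
            (fun v => decide (v ≠ 0))) := by
  have step1 : (List.range m).foldl
      (fun acc j => ((List.range n).reverse).foldl
        (fun acc i => if w i j ≠ 0 then acc ++ [w i j] else acc) acc) []
    = (List.range m).foldl
      (fun acc j => acc ++ (((List.range n).reverse).map (fun i => w i j)).filter
        (fun x => decide (x ≠ 0))) [] :=
    PySem.List.foldl_congr_mem _ _ _ _ (fun acc j _ => collect_inner (fun i => w i j) _ acc)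
  rw [step1, PySem.List.foldl_append_eq_flatMap, List.nil_append]
  rw [List.flatMap_def, List.flatMap_def]
  congr 1
  refine List.map_congr_left (fun j hj => ?_)
  rw [List.mem_range] at hj
  congr 1
  refine List.map_congr_left (fun i hi => ?_)
  rw [List.mem_reverse, List.mem_range] at hi
  exact h i j hi hj

-- ===== VERDICT (by name: the statement is the Claim_ definition above) =====
theorem press_dough_spec : Claim_equal_press_dough := by
  intro dough _ hpre
  unfold Spec_press_dough
  obtain ⟨hne, hrows⟩ := hpre
  simp only [press_dough, press_dough_alt]
  set n := dough.length with hn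
  set m := (dough.getD 0 []).length with hm
  have hshape_d : pvShape n m dough := by
    refine ⟨rfl, fun a ha => ?_⟩
    have hget : dough.getD a [] = dough[a] := by
      rw [List.getD_eq_getElem?_getD, List.getElem?_eq_getElem ha]; rfl
    rw [hget]
    exact hrows _ (List.getElem_mem ha)
  have hshape_0 : pvShape n m ((List.range n).map (fun _ => List.replicate m (0:Int))) := by
    refine ⟨by simp, fun a ha => ?_⟩
    rw [getD_map_range n _ _ ha]
    simp
  have hstepA : ∀ g i j, i < n → j < m → pvShape n m g →
      pvShape n m (stepH dough (stepV dough g i j) i j) ∧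
      ∀ a b, pvGet (stepH dough (stepV dough g i j) i j) a b = pvGet g a b + sd dough i j a b := by
    intro g i j hi hj hs
    refine ⟨pvShape_stepH dough (pvShape_stepV dough hs i j) i j, fun a b => ?_⟩
    rw [pvGet_stepH dough (pvShape_stepV dough hs i j) hi hj,
      pvGet_stepV dough hs hi hj, sd]
    ring
  obtain ⟨-, haddf0⟩ := fold2_gget _ (sd dough) hstepA _ hshape_0
  set addf := (List.range n).foldl
    (fun g i => (List.range m).foldl (fun g j => stepH dough (stepV dough g i j) i j) g)
    ((List.range n).map (fun _ => List.replicate m (0:Int))) with haddf_def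
  have haddf : ∀ a b, a < n → b < m → pvGet addf a b = Fnet dough m a b := by
    intro a b ha hb
    rw [haddf0 a b, addf0_zero, sum_sd_eq dough m ha hb, zero_add]
  have hstepB : ∀ g i j, i < n → j < m → pvShape n m g →
      pvShape n m (pvUpd g i j (-(pvGet addf i j))) ∧
      ∀ a b, pvGet (pvUpd g i j (-(pvGet addf i j))) a b
        = pvGet g a b + (if a = i ∧ b = j then -(pvGet addf i j) else 0) := by
    intro g i j hi hj hs
    exact ⟨pvShape_pvUpd hs i j _, fun a b => pvGet_pvUpd hs hi hj _ a b⟩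
  obtain ⟨-, hd2⟩ := fold2_gget _ _ hstepB dough hshape_d
  set dough2 := (List.range n).foldl
    (fun g i => (List.range m).foldl (fun g j => pvUpd g i j (-(pvGet addf i j))) g) dough
    with hd2_def
  have hdough2 : ∀ a b, a < n → b < m →
      pvGet dough2 a b = pvGet dough a b - Fnet dough m a b := by
    intro a b ha hb
    rw [hd2 a b]
    have e1 : ∀ i j : Nat, (a = i ∧ b = j) ↔ (i = a ∧ j = b) := by intro i j; omega
    simp only [e1, sum2_pt]
    rw [if_pos ⟨ha, hb⟩, haddf a b ha hb]
    ring
  set newg := (List.range n).map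
    (fun i => (List.range m).map (fun j => pvGet dough i j - deltaAt dough n m i j))
    with hnewg_def
  have hnew : ∀ a b, a < n → b < m →
      pvGet newg a b = pvGet dough a b - Fnet dough m a b := by
    intro a b ha hb
    rw [hnewg_def, grid_build_get n m _ ha hb, deltaAt_eq dough m ha hb]
  have hval : ∀ i j, i < n → j < m → pvGet dough2 i j = pvGet newg i j := by
    intro i j hi hj
    rw [hdough2 i j hi hj, hnew i j hi hj]
  exact collect_eq n m (fun i j => pvGet dough2 i j) (fun i j => pvGet newg i j) hval
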